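-- pv_equiv track=rewrite | github.com/benjaminfjones/math | KPJStrata/bucket_fill.py | sum_partitions
-- ===== SOURCE A (Python) =====
-- def sum_partitions(mu, nu):
--     """
--     Returns the partition lam which is the sum of the partitions `mu` and `nu`
--     which need not have the same number of parts.
--     """
--     lm = len(mu)
--     ln = len(nu)
--     if lm > ln:
--         lam = [ mu[i] + nu[i] for i in range(ln) ]
--         lam.extend(mu[ln:])
--     else:
--         lam = [ mu[i] + nu[i] for i in range(lm) ]
--         lam.extend(nu[lm:])
--     return lam
-- ===== SOURCE B (Python) =====
-- def sum_partitions(mu, nu):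
--     """Consume two stacks: work on reversed copies, repeatedly pop one part
--     from each while both are nonempty, appending the sums; then append the
--     leftover stack (reversed back)."""
--     p, q = mu[::-1], nu[::-1]
--     lam = []
--     while p and q:
--         lam.append(p.pop() + q.pop())
--     lam.extend(reversed(p or q))
--     return lam
-- ===== Notes on version B (the rewrite author's own statement) =====
-- stated objective: alternative
-- what changed: Replaces A's length comparison, index-based comprehension and tail-extend with stack consumption: both lists are reversed into working stacks, a while loop pops and sums one part from each until one stack empties, and the leftover stack is reversed onto the result.
import Mathlib
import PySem

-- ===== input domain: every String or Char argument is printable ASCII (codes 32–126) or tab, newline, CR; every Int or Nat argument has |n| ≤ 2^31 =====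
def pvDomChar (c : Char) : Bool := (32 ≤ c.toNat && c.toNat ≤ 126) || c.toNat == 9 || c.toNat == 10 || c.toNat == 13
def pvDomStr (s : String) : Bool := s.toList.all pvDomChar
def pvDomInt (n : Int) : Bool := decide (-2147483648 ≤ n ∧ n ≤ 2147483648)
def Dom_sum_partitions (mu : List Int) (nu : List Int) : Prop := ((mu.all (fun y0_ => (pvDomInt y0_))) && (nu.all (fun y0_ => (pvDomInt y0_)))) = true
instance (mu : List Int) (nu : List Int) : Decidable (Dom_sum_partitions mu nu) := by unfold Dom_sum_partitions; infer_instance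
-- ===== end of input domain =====

-- B replaces A's length comparison, indexed comprehension and tail-extend with
-- stack consumption: pop-and-sum from two reversed working stacks, then append
-- the leftover stack reversed back (alternative decomposition, same cost).

-- ===== PORT A =====
-- Literal port of A: length comparison, comprehension over range of the shorter
-- length (indices always in range, so getD's default 0 is never used), then
-- extend with the longer list's tail (the slice mu[ln:] / nu[lm:] = drop).
def sum_partitions (mu : List Int) (nu : List Int) : List Int :=
  let lm := mu.length
  let ln := nu.length
  if lm > ln then
    ((List.range ln).map (fun i => mu.getD i 0 + nu.getD i 0)) ++ mu.drop ln
  else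
    ((List.range lm).map (fun i => mu.getD i 0 + nu.getD i 0)) ++ nu.drop lm

-- ===== PORT B =====
-- The while loop of B: while both stacks are nonempty, pop the last element of
-- each (dropLast/getLast!, i.e. Python list.pop()) and append their sum to lam;
-- returns the final loop state (p, q, lam).
def pvPopLoop : List Int → List Int → List Int → (List Int × List Int × List Int)
  | [], q, lam => ([], q, lam)
  | a :: p, [], lam => (a :: p, [], lam)
  | a :: p, b :: q, lam =>
      pvPopLoop (a :: p).dropLast (b :: q).dropLast
        (lam ++ [(a :: p).getLast! + (b :: q).getLast!])
termination_by p _ _ => p.length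
decreasing_by simp [List.length_dropLast]

-- p, q = mu[::-1], nu[::-1]; the loop; then lam.extend(reversed(p or q)).
def sum_partitions_alt (mu : List Int) (nu : List Int) : List Int :=
  let r := pvPopLoop mu.reverse nu.reverse []
  r.2.2 ++ (if r.1 ≠ [] then r.1 else r.2.1).reverse

-- ===== PRECONDITION & SPEC =====
def Spec_sum_partitions (mu : List Int) (nu : List Int) (out : List Int) : Prop := out = sum_partitions_alt mu nu
instance (mu : List Int) (nu : List Int) (out : List Int) : Decidable (Spec_sum_partitions mu nu out) := by unfold Spec_sum_partitions; infer_instance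

-- ===== CLAIM (what is proved, stated in full; the proofs are below) =====
def Claim_equal_sum_partitions : Prop := ∀ (mu : List Int) (nu : List Int), Dom_sum_partitions mu nu → Spec_sum_partitions mu nu (sum_partitions mu nu)

-- ===== LEMMAS AND PROOFS =====

theorem sum_partitions_nil_left (nu : List Int) : sum_partitions [] nu = nu := by
  simp [sum_partitions]

theorem sum_partitions_nil_right (mu : List Int) : sum_partitions mu [] = mu := by
  cases mu <;> simp [sum_partitions]

theorem sum_partitions_cons (a b : Int) (mu nu : List Int) :
    sum_partitions (a :: mu) (b :: nu) = (a + b) :: sum_partitions mu nu := by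
  simp only [sum_partitions, List.length_cons]
  by_cases hgt : mu.length > nu.length
  · simp [hgt, List.range_succ_eq_map, List.map_map, Function.comp]
  · simp [hgt, List.range_succ_eq_map, List.map_map, Function.comp]

theorem pvPopLoop_concat (a b : Int) (p q lam : List Int) :
    pvPopLoop (p ++ [a]) (q ++ [b]) lam = pvPopLoop p q (lam ++ [a + b]) := by
  cases hp : p ++ [a] with
  | nil => simp at hp
  | cons x p' =>
    cases hq : q ++ [b] with
    | nil => simp at hq
    | cons y q' =>
      rw [pvPopLoop]
      rw [← hp, ← hq]
      simp

-- The loop state, rendered as B renders it, equals lam ++ A's result.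
theorem pvPopLoop_spec (mu : List Int) :
    ∀ (nu lam : List Int),
      (let r := pvPopLoop mu.reverse nu.reverse lam
       r.2.2 ++ (if r.1 ≠ [] then r.1 else r.2.1).reverse)
      = lam ++ sum_partitions mu nu := by
  induction mu with
  | nil =>
    intro nu lam
    simp [pvPopLoop, sum_partitions_nil_left]
  | cons a mu ih =>
    intro nu lam
    cases nu with
    | nil =>
      rw [sum_partitions_nil_right]
      cases h : (a :: mu).reverse with
      | nil => simp at h
      | cons x p' =>
        have h' : mu.reverse ++ [a] = x :: p' := by simpa using h
        simp only [List.reverse_nil, pvPopLoop]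
        simp [← h']
    | cons b nu =>
      simp only [List.reverse_cons]
      rw [pvPopLoop_concat, ih nu (lam ++ [a + b]), sum_partitions_cons]
      simp

-- ===== VERDICT (by name: the statement is the Claim_ definition above) =====
theorem sum_partitions_spec : Claim_equal_sum_partitions := by
  intro mu nu _
  unfold Spec_sum_partitions sum_partitions_alt
  simpa using (pvPopLoop_spec mu nu []).symm
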